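-- pv_equiv track=rewrite | github.com/savera1226/ml-project-healthcare-premium-prediction | prediction_helper.py | _col_matches
-- ===== SOURCE A (Python) =====
-- def _col_matches(cols, prefix, value):
--     if value is None:
--         return None
--     target = f"{prefix}_{value}".lower().replace(" ", "_")
--     for c in cols:
--         if str(c).lower().replace(" ", "_") == target:
--             return c
--     for c in cols:
--         s = str(c).lower().replace(" ", "_")
--         if s.startswith(prefix.lower() + "_") and s.endswith(value.lower().replace(" ", "_")):
--             return c
--     return None
-- ===== SOURCE B (Python) =====
-- def _col_matches(cols, prefix, value):
--     if value is None:
--         return None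
--     target = (prefix + "_" + value).lower().replace(" ", "_")
--     pfx = prefix.lower() + "_"
--     sfx = value.lower().replace(" ", "_")
--     fallback = None
--     for c in cols:
--         s = str(c).lower().replace(" ", "_")
--         if s == target:
--             return c
--         if fallback is None and s.startswith(pfx) and s.endswith(sfx):
--             fallback = c
--     return fallback
-- ===== Notes on version B (the rewrite author's own statement) =====
-- stated objective: simpler
-- what changed: Replaced A's two full passes over cols (one for exact matches, a second recomputing each normalized name for prefix/suffix matches) by a single pass that normalizes each column once, returns an exact match immediately and remembers only the first fallback candidate.
import Mathlib
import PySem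

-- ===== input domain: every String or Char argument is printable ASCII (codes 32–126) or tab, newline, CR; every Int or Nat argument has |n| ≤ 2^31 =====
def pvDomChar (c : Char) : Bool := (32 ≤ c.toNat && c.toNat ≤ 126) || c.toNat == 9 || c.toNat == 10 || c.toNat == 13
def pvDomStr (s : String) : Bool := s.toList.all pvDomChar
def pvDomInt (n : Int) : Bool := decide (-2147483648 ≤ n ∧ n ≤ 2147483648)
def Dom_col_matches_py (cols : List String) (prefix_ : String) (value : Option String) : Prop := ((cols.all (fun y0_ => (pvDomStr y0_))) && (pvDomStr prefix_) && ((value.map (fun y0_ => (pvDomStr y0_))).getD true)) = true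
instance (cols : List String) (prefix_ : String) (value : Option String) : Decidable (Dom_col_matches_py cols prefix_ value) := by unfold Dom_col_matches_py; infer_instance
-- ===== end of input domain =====

-- B differs from A by doing a single pass (exact match returned eagerly, first fallback remembered); return values are identical.

-- ===== PORT A =====
-- str(c).lower().replace(" ", "_")  (cols hold strings, so str() is the identity)
def pvNorm (s : String) : String := PySem.Str.replace (PySem.Str.lower s) " " "_"

def col_matches_py (cols : List String) (prefix_ : String) (value : Option String) : Option String :=
  match value with
  | none => none
  | some v =>
    let target := pvNorm (PySem.Str.join "" [prefix_, "_", v])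
    -- first for-loop: first exact match
    match cols.find? (fun c => pvNorm c == target) with
    | some c => some c
    | none =>
      -- second for-loop: first prefix/suffix match
      cols.find? (fun c =>
        PySem.Str.startswith (pvNorm c) (PySem.Str.join "" [PySem.Str.lower prefix_, "_"]) &&
        PySem.Str.endswith (pvNorm c) (pvNorm v))

-- ===== PORT B =====
-- single pass with a fallback accumulator (Source B's loop)
def colFbLoop (target pfx sfx : String) (fb : Option String) : List String → Option String
  | [] => fb
  | c :: rest =>
    let s := pvNorm c
    if s == target then some c
    else colFbLoop target pfx sfx
      (if fb == none && PySem.Str.startswith s pfx && PySem.Str.endswith s sfx then some c else fb) rest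

def col_matches_py_alt (cols : List String) (prefix_ : String) (value : Option String) : Option String :=
  match value with
  | none => none
  | some v =>
    let target := pvNorm (PySem.Str.join "" [prefix_, "_", v])
    let pfx := PySem.Str.join "" [PySem.Str.lower prefix_, "_"]
    let sfx := pvNorm v
    colFbLoop target pfx sfx none cols

-- ===== PRECONDITION & SPEC =====
def Spec_col_matches_py (cols : List String) (prefix_ : String) (value : Option String) (out : Option String) : Prop := out = col_matches_py_alt cols prefix_ value
instance (cols : List String) (prefix_ : String) (value : Option String) (out : Option String) : Decidable (Spec_col_matches_py cols prefix_ value out) := by unfold Spec_col_matches_py; infer_instance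

-- ===== CLAIM (what is proved, stated in full; the proofs are below) =====
def Claim_equal_col_matches_py : Prop := ∀ (cols : List String) (prefix_ : String) (value : Option String), Dom_col_matches_py cols prefix_ value → Spec_col_matches_py cols prefix_ value (col_matches_py cols prefix_ value)

-- ===== LEMMAS AND PROOFS =====
theorem colFbLoop_eq (target pfx sfx : String) (fb : Option String) (cols : List String) :
    colFbLoop target pfx sfx fb cols =
      match cols.find? (fun c => pvNorm c == target) with
      | some c => some c
      | none => fb.or (cols.find? (fun c =>
          PySem.Str.startswith (pvNorm c) pfx && PySem.Str.endswith (pvNorm c) sfx)) := by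
  induction cols generalizing fb with
  | nil => cases fb <;> simp [colFbLoop]
  | cons c rest ih =>
    simp only [colFbLoop, List.find?]
    by_cases hx : pvNorm c == target
    · simp [hx]
    · simp only [Bool.not_eq_true] at hx
      rw [hx, if_neg (by simp)]
      rw [ih]
      cases hrest : rest.find? (fun c => pvNorm c == target) with
      | some x => cases fb <;> simp
      | none =>
        cases fb with
        | some y => simp
        | none =>
          by_cases h1 : PySem.Chars.startswith (pvNorm c).toList pfx.toList = true <;>
          by_cases h2 : PySem.Chars.endswith (pvNorm c).toList sfx.toList = true <;>
          simp [h1, h2]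

-- ===== VERDICT (by name: the statement is the Claim_ definition above) =====
theorem col_matches_py_spec : Claim_equal_col_matches_py := by
  intro cols prefix_ value _
  unfold Spec_col_matches_py col_matches_py col_matches_py_alt
  cases value with
  | none => rfl
  | some v =>
    simp only [colFbLoop_eq]
    cases cols.find? (fun c => pvNorm c == pvNorm (PySem.Str.join "" [prefix_, "_", v])) <;> simp
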